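-- pv_equiv track=rewrite | github.com/nipreps/eddymotion | src/eddymotion/utils.py | centralsym_iterator
-- ===== SOURCE A (Python) =====
-- from itertools import chain, zip_longest
-- from typing import Iterator
--
-- def centralsym_iterator(size: int = None, **kwargs) -> Iterator[int]:
--     """
--     Traverse the dataset starting from the center and alternatingly progressing to the sides.
--
--     Parameters
--     ----------
--     size : :obj:`int`
--         Number of volumes in the dataset
--         (for instance, the number of orientations in a DWI)
--
--     Returns
--     -------
--     :obj:`~typing.Iterator`
--         The sorted index order.
--
--     Examples
--     --------
--     >>> list(centralsym_iterator(10))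
--     [5, 4, 6, 3, 7, 2, 8, 1, 9, 0]
--     >>> list(centralsym_iterator(11))
--     [5, 4, 6, 3, 7, 2, 8, 1, 9, 0, 10]
--
--     """
--     if size is None and "bvals" in kwargs:
--         size = len(kwargs["bvals"])
--     if size is None:
--         raise TypeError("Cannot build iterator without size")
--     linear = list(range(size))
--     return (
--         x
--         for x in chain.from_iterable(
--             zip_longest(
--                 linear[size // 2 :],
--                 reversed(linear[: size // 2]),
--             )
--         )
--         if x is not None
--     )
-- ===== SOURCE B (Python) =====
-- def centralsym_iterator(size=None, **kwargs):
--     """Closed form: position k holds size//2 + k//2 if k is even, else size//2 - 1 - k//2."""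
--     if size is None and "bvals" in kwargs:
--         size = len(kwargs["bvals"])
--     if size is None:
--         raise TypeError("Cannot build iterator without size")
--     half = size // 2
--     return (half + k // 2 if k % 2 == 0 else half - 1 - k // 2 for k in range(size))
-- ===== Notes on version B (the rewrite author's own statement) =====
-- stated objective: simpler
-- what changed: Replaces the slice/reversed/zip_longest/chain interleaving of two half-lists with a closed-form per-position formula: the generator yields half + k//2 for even k and half - 1 - k//2 for odd k over a single range(size), with no lists or second sequence at all.
import Mathlib
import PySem

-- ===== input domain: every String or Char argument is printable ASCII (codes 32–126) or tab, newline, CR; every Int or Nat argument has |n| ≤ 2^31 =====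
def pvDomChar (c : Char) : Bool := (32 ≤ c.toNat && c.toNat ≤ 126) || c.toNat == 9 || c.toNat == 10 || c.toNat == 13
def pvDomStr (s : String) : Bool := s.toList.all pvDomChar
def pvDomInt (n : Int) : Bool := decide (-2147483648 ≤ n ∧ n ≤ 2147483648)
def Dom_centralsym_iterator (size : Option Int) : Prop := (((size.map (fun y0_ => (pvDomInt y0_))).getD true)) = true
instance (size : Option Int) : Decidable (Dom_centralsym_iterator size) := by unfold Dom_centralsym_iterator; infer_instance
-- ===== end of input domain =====

-- B replaces A's slice/reversed/zip_longest/chain interleaving pipeline with a closed-form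
-- per-position formula: position k holds half + k//2 for even k, half - 1 - k//2 for odd k (simpler).
-- Equivalence is about the sequence of yielded values (both return generators in Python).

-- ===== PORT A =====
-- zip_longest(xs, ys) with fillvalue None, transliterated
def pvZipLongest : List Int → List Int → List (Option Int × Option Int)
  | [], [] => []
  | x :: xs, [] => (some x, none) :: pvZipLongest xs []
  | [], y :: ys => (none, some y) :: pvZipLongest [] ys
  | x :: xs, y :: ys => (some x, some y) :: pvZipLongest xs ys

def centralsym_iterator (size : Option Int) : List Int :=
  match size with
  | none => []   -- Python raises TypeError here; excluded by Pre_
  | some n =>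
    let linear := PySem.List.pyRange 0 n 1
    let h := PySem.Int.floordiv n 2
    -- chain.from_iterable(zip_longest(linear[size//2:], reversed(linear[:size//2]))), dropping None
    ((pvZipLongest (PySem.List.slice linear (some h) none)
        ((PySem.List.slice linear none (some h)).reverse)).flatMap
      (fun p => [p.1, p.2])).filterMap id

-- ===== PORT B =====
def centralsym_iterator_alt (size : Option Int) : List Int :=
  match size with
  | none => []   -- Python raises TypeError here; excluded by Pre_
  | some n =>
    let half := PySem.Int.floordiv n 2
    (PySem.List.pyRange 0 n 1).map (fun k =>
      if PySem.Int.mod k 2 = 0 then half + PySem.Int.floordiv k 2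
      else half - 1 - PySem.Int.floordiv k 2)

-- ===== PRECONDITION & SPEC =====
-- Pre_ excludes only size = None, on which Python A raises TypeError.
def Pre_centralsym_iterator (size : Option Int) : Prop := size ≠ none
instance (size : Option Int) : Decidable (Pre_centralsym_iterator size) := by
  unfold Pre_centralsym_iterator; infer_instance
def pvWitness_centralsym_iterator : Option Int := some 10

def Spec_centralsym_iterator (size : Option Int) (out : List Int) : Prop := out = centralsym_iterator_alt size
instance (size : Option Int) (out : List Int) : Decidable (Spec_centralsym_iterator size out) := by unfold Spec_centralsym_iterator; infer_instance

-- ===== CLAIM (what is proved, stated in full; the proofs are below) =====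
def Claim_equal_centralsym_iterator : Prop := ∀ (size : Option Int), Dom_centralsym_iterator size → Pre_centralsym_iterator size → Spec_centralsym_iterator size (centralsym_iterator size)

-- ===== LEMMAS AND PROOFS =====

-- interleaving, the normal form of A's zip_longest pipeline
def pvInter : List Int → List Int → List Int
  | [], ys => ys
  | xs, [] => xs
  | x :: xs, y :: ys => x :: y :: pvInter xs ys

theorem pvInter_nil_right (xs : List Int) : pvInter xs [] = xs := by
  cases xs <;> rfl

-- A's flatten-filter of zip_longest is the interleaving
theorem flat_zipLongest (xs : List Int) : ∀ ys,
    ((pvZipLongest xs ys).flatMap (fun p => [p.1, p.2])).filterMap id = pvInter xs ys := by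
  induction xs with
  | nil => intro ys; induction ys with
    | nil => simp [pvZipLongest, pvInter]
    | cons y ys ih => simp [pvZipLongest, pvInter, List.filterMap] at ih ⊢; exact ih
  | cons x xs ih =>
    intro ys
    cases ys with
    | nil =>
      have := ih []
      simp [pvZipLongest, pvInter, List.filterMap] at this ⊢
      simpa [pvInter_nil_right] using this
    | cons y ys =>
      have := ih ys
      simp [pvZipLongest, pvInter, List.filterMap] at this ⊢
      exact this

-- B's closed-form formula, reindexed over Nat positions
def pvG (h1 h2 : Int) (k : Nat) : Int :=
  if k % 2 = 0 then h1 + (k / 2 : Nat) else h2 - (k / 2 : Nat)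

theorem pvG_shift (h1 h2 : Int) (k : Nat) : pvG h1 h2 (k + 2) = pvG (h1 + 1) (h2 - 1) k := by
  unfold pvG
  have h2m : (k + 2) % 2 = k % 2 := by omega
  have h2d : (k + 2) / 2 = k / 2 + 1 := by omega
  rw [h2m, h2d]
  split <;> push_cast <;> ring

-- the closed-form list IS the interleaving of the up-range and the down-range
theorem pvG_key : ∀ (j : Nat) (h1 h2 : Int),
    (List.range j).map (pvG h1 h2) =
      pvInter (PySem.List.pyRange h1 (h1 + ((j + 1) / 2 : Nat)) 1)
              (PySem.List.pyRange h2 (h2 - (j / 2 : Nat)) (-1)) := by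
  intro j
  induction j using Nat.twoStepInduction with
  | zero =>
    intro h1 h2
    rw [PySem.List.pyRange_one_eq_nil (by norm_num : h1 + (((0+1)/2 : Nat) : Int) ≤ h1),
      PySem.List.pyRange_neg_one_eq_nil (by norm_num : h2 ≤ h2 - ((0/2 : Nat) : Int))]
    rfl
  | one =>
    intro h1 h2
    have hup : PySem.List.pyRange h1 (h1 + ((1+1)/2 : Nat)) 1 = [h1] := by
      have : h1 + (((1+1)/2 : Nat) : Int) = h1 + 1 := by norm_num
      rw [this]; exact PySem.List.pyRange_one_singleton h1
    have hdn : PySem.List.pyRange h2 (h2 - ((1/2 : Nat) : Int)) (-1) = [] := by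
      apply PySem.List.pyRange_neg_one_eq_nil; norm_num
    rw [hup, hdn]
    simp [pvInter, pvG, List.range_succ]
  | more j ih _ =>
    intro h1 h2
    have hrange : List.range (j + 2) = 0 :: 1 :: (List.range j).map (· + 2) := by
      rw [List.range_succ_eq_map, List.range_succ_eq_map, List.map_cons, List.map_map]
      rfl
    have hcnt1 : ((j + 2 + 1) / 2 : Nat) = (j + 1) / 2 + 1 := by omega
    have hcnt2 : ((j + 2) / 2 : Nat) = j / 2 + 1 := by omega
    rw [hrange, hcnt1, hcnt2]
    have hup : PySem.List.pyRange h1 (h1 + (((j+1)/2 + 1 : Nat) : Int)) 1 =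
        h1 :: PySem.List.pyRange (h1 + 1) ((h1 + 1) + (((j+1)/2 : Nat) : Int)) 1 := by
      rw [PySem.List.pyRange_one_cons (by push_cast; omega)]
      congr 1
      push_cast; ring_nf
    have hdn : PySem.List.pyRange h2 (h2 - ((j/2 + 1 : Nat) : Int)) (-1) =
        h2 :: PySem.List.pyRange (h2 - 1) ((h2 - 1) - ((j/2 : Nat) : Int)) (-1) := by
      rw [PySem.List.pyRange_neg_one_cons (by push_cast; omega)]
      congr 1
      push_cast; ring_nf
    rw [hup, hdn]
    show _ = h1 :: h2 :: pvInter _ _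
    have hmap : (((List.range j).map (· + 2)).map (pvG h1 h2)) =
        (List.range j).map (pvG (h1 + 1) (h2 - 1)) := by
      rw [List.map_map]
      apply List.map_congr_left
      intro k _
      exact pvG_shift h1 h2 k
    simp only [List.map_cons, hmap, ih]
    congr 1
    · simp [pvG]
    · congr 1
      simp [pvG]

-- B's Int-level formula agrees with pvG on casts of Nat positions
theorem pvG_cast (h : Int) (k : Nat) :
    (if PySem.Int.mod (k : Int) 2 = 0 then h + PySem.Int.floordiv (k : Int) 2
     else h - 1 - PySem.Int.floordiv (k : Int) 2) = pvG h (h - 1) k := by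
  unfold pvG
  rw [PySem.Int.mod_eq_emod_of_pos (by norm_num), PySem.Int.floordiv_eq_ediv_of_pos (by norm_num)]
  have h1 : ((k : Int) % 2 = 0) ↔ (k % 2 = 0) := by omega
  have h2 : ((k : Int) / 2) = ((k / 2 : Nat) : Int) := by omega
  rw [h2]
  by_cases hk : k % 2 = 0 <;> simp [hk, h1]

-- ===== VERDICT (by name: the statement is the Claim_ definition above) =====
theorem centralsym_iterator_spec : Claim_equal_centralsym_iterator := by
  intro size _ hpre
  cases size with
  | none => exact absurd rfl hpre
  | some n =>
    show centralsym_iterator (some n) = centralsym_iterator_alt (some n)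
    unfold centralsym_iterator centralsym_iterator_alt
    dsimp only
    set h := PySem.Int.floordiv n 2 with hh
    have hediv : h = n / 2 := PySem.Int.floordiv_eq_ediv_of_pos (by omega)
    rw [flat_zipLongest]
    by_cases hn : 0 ≤ n
    · have hb : 0 ≤ h ∧ h ≤ n := by constructor <;> omega
      have hsplit : PySem.List.pyRange 0 n 1 =
          PySem.List.pyRange 0 h 1 ++ PySem.List.pyRange h n 1 :=
        PySem.List.pyRange_one_append 0 h n hb.1 hb.2
      have hfrom : PySem.List.slice (PySem.List.pyRange 0 n 1) (some h) none =
          PySem.List.pyRange h n 1 := by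
        rw [PySem.List.slice_from _ hb.1, hsplit]
        simp [PySem.List.length_pyRange_one]
      have hto : PySem.List.slice (PySem.List.pyRange 0 n 1) none (some h) =
          PySem.List.pyRange 0 h 1 := by
        rw [PySem.List.slice_to _ hb.1, hsplit]
        simp [PySem.List.length_pyRange_one]
      have hrev : (PySem.List.pyRange 0 h 1).reverse = PySem.List.pyRange (h - 1) (-1) (-1) := by
        rw [PySem.List.pyRange_neg_one_eq_reverse]
        norm_num
      rw [hfrom, hto, hrev]
      -- rewrite B's side into the Nat-indexed closed form, then apply pvG_key
      have hmapB : (PySem.List.pyRange 0 n 1).map (fun k =>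
          if PySem.Int.mod k 2 = 0 then h + PySem.Int.floordiv k 2
          else h - 1 - PySem.Int.floordiv k 2) = (List.range n.toNat).map (pvG h (h - 1)) := by
        rw [PySem.List.pyRange_one 0 n]
        simp only [sub_zero]
        rw [List.map_map]
        apply List.map_congr_left
        intro k _
        simp only [Function.comp_apply, zero_add]
        exact pvG_cast h k
      rw [hmapB, pvG_key n.toNat h (h - 1)]
      congr 2
      · omega
      · omega
    · -- n < 0: everything is empty on both sides
      rw [PySem.List.pyRange_one_eq_nil (by omega : n ≤ (0:Int))]
      simp [PySem.List.slice, pvInter]
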